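-- pv_equiv track=rewrite | github.com/Dudzian/Dudzian | bot_core/exchanges/binance/_utils.py | _normalize_depth
-- ===== SOURCE A (Python) =====
-- def _normalize_depth(depth: int) -> int:
--     """Zwraca najbliższą wartość ``limit`` akceptowaną przez API depth."""
--
--     if depth <= 0:
--         raise ValueError("Parametr depth musi być dodatni.")
--
--     allowed = (5, 10, 20, 50, 100, 500, 1000)
--     for candidate in allowed:
--         if depth <= candidate:
--             return candidate
--     return allowed[-1]
-- ===== SOURCE B (Python) =====
-- import bisect
--
--
-- def _normalize_depth(depth: int) -> int:
--     """Zwraca najbliższą wartość ``limit`` akceptowaną przez API depth."""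
--
--     if depth <= 0:
--         raise ValueError("Parametr depth musi byc dodatni.")
--
--     allowed = (5, 10, 20, 50, 100, 500, 1000)
--     idx = bisect.bisect_left(allowed, depth)
--     return allowed[min(idx, len(allowed) - 1)]
-- ===== Notes on version B (the rewrite author's own statement) =====
-- stated objective: idiomatic
-- what changed: Replaces the linear first-fit scan over the allowed tuple with bisect.bisect_left (binary search) and an index clamp that yields the max fallback.
import Mathlib
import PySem

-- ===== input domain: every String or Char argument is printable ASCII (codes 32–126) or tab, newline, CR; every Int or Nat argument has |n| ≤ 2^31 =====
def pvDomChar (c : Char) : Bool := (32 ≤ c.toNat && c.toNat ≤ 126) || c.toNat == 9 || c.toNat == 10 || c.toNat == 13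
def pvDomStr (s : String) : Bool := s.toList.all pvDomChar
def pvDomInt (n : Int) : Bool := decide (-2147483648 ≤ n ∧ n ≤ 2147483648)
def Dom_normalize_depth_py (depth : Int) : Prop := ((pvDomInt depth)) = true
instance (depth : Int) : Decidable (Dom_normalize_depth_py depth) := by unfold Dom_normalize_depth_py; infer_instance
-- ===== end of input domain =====

-- B replaces A's linear first-fit scan with bisect_left (binary search) plus an index clamp: more idiomatic, same values.


-- the tuple allowed = (5, 10, 20, 50, 100, 500, 1000), shared literal of both sources
def pvAllowed : List Int := [5, 10, 20, 50, 100, 500, 1000]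

-- ===== PORT A =====
-- the 'for candidate in allowed: if depth <= candidate: return candidate' loop with early return
def pvScanA (depth : Int) : List Int → Option Int
  | [] => none
  | c :: cs => if depth ≤ c then some c else pvScanA depth cs

def normalize_depth_py (depth : Int) : Int :=
  -- 'if depth <= 0: raise ValueError' is excluded by Pre_normalize_depth_py
  match pvScanA depth pvAllowed with
  | some c => c
  | none => (PySem.List.pyGet? pvAllowed (-1)).getD 0   -- return allowed[-1]

-- ===== PORT B =====
def normalize_depth_py_alt (depth : Int) : Int :=
  -- 'if depth <= 0: raise ValueError' is excluded by Pre_normalize_depth_py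
  let idx := PySem.List.bisectLeft pvAllowed depth
  (PySem.List.pyGet? pvAllowed (Int.ofNat (min idx (pvAllowed.length - 1)))).getD 0

-- ===== PRECONDITION & SPEC =====
-- A raises ValueError for depth <= 0; those inputs are outside Pre_.
def Pre_normalize_depth_py (depth : Int) : Prop := 0 < depth
instance (depth : Int) : Decidable (Pre_normalize_depth_py depth) := by unfold Pre_normalize_depth_py; infer_instance
def pvWitness_normalize_depth_py : Int := 7

def Spec_normalize_depth_py (depth : Int) (out : Int) : Prop := out = normalize_depth_py_alt depth
instance (depth : Int) (out : Int) : Decidable (Spec_normalize_depth_py depth out) := by unfold Spec_normalize_depth_py; infer_instance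

-- ===== CLAIM (what is proved, stated in full; the proofs are below) =====
def Claim_equal_normalize_depth_py : Prop := ∀ (depth : Int), Dom_normalize_depth_py depth → Pre_normalize_depth_py depth → Spec_normalize_depth_py depth (normalize_depth_py depth)

-- ===== LEMMAS AND PROOFS =====
-- bisect_left on the fixed sorted tuple lands at index k iff depth is in the k-th gap
theorem pvBisect_eq (depth : Int) (k : Nat) (hk : k < pvAllowed.length)
    (hlo : ∀ (j : Nat) (hj : j < pvAllowed.length), j < k → pvAllowed[j] < depth)
    (hhi : depth ≤ pvAllowed[k]) :
    PySem.List.bisectLeft pvAllowed depth = k := by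
  obtain ⟨hle, hlt, hge⟩ := PySem.List.bisectLeft_spec pvAllowed depth (by decide)
  set i := PySem.List.bisectLeft pvAllowed depth with hi
  have h1 : i ≤ k := by
    by_contra h
    exact absurd hhi (not_le.mpr (hlt k hk (by omega)))
  have h2 : k ≤ i := by
    by_contra h
    have ha := hge i (by omega) le_rfl
    have hb := hlo i (by omega) (by omega)
    omega
  omega

-- ===== VERDICT (by name: the statement is the Claim_ definition above) =====
theorem normalize_depth_py_spec : Claim_equal_normalize_depth_py := by
  intro depth _ _
  unfold Spec_normalize_depth_py normalize_depth_py normalize_depth_py_alt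
  by_cases h5 : depth ≤ 5
  · rw [pvBisect_eq depth 0 (by decide) (by intro j hj hjk; omega) (by simpa [pvAllowed] using h5)]
    simp [pvScanA, pvAllowed, h5, PySem.List.pyGet?, PySem.List.pyIdx?]
  · by_cases h10 : depth ≤ 10
    · rw [pvBisect_eq depth 1 (by decide) (by intro j hj hjk; interval_cases j <;> simp [pvAllowed] <;> omega) (by simpa [pvAllowed] using h10)]
      simp [pvScanA, pvAllowed, h5, h10, PySem.List.pyGet?, PySem.List.pyIdx?]
    · by_cases h20 : depth ≤ 20
      · rw [pvBisect_eq depth 2 (by decide) (by intro j hj hjk; interval_cases j <;> simp [pvAllowed] <;> omega) (by simpa [pvAllowed] using h20)]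
        simp [pvScanA, pvAllowed, h5, h10, h20, PySem.List.pyGet?, PySem.List.pyIdx?]
      · by_cases h50 : depth ≤ 50
        · rw [pvBisect_eq depth 3 (by decide) (by intro j hj hjk; interval_cases j <;> simp [pvAllowed] <;> omega) (by simpa [pvAllowed] using h50)]
          simp [pvScanA, pvAllowed, h5, h10, h20, h50, PySem.List.pyGet?, PySem.List.pyIdx?]
        · by_cases h100 : depth ≤ 100
          · rw [pvBisect_eq depth 4 (by decide) (by intro j hj hjk; interval_cases j <;> simp [pvAllowed] <;> omega) (by simpa [pvAllowed] using h100)]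
            simp [pvScanA, pvAllowed, h5, h10, h20, h50, h100, PySem.List.pyGet?, PySem.List.pyIdx?]
          · by_cases h500 : depth ≤ 500
            · rw [pvBisect_eq depth 5 (by decide) (by intro j hj hjk; interval_cases j <;> simp [pvAllowed] <;> omega) (by simpa [pvAllowed] using h500)]
              simp [pvScanA, pvAllowed, h5, h10, h20, h50, h100, h500, PySem.List.pyGet?, PySem.List.pyIdx?]
            · by_cases h1000 : depth ≤ 1000
              · rw [pvBisect_eq depth 6 (by decide) (by intro j hj hjk; interval_cases j <;> simp [pvAllowed] <;> omega) (by simpa [pvAllowed] using h1000)]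
                simp [pvScanA, pvAllowed, h5, h10, h20, h50, h100, h500, h1000, PySem.List.pyGet?, PySem.List.pyIdx?]
              · -- depth > 1000: scan falls through, bisect returns 7, clamped to 6
                have hb : PySem.List.bisectLeft pvAllowed depth = 7 := by
                  obtain ⟨hle, hlt, hge⟩ := PySem.List.bisectLeft_spec pvAllowed depth (by decide)
                  set i := PySem.List.bisectLeft pvAllowed depth with hi
                  simp only [pvAllowed, List.length_cons, List.length_nil] at hle hge
                  by_contra h
                  have := hge 6 (by omega) (by omega)
                  simp at this
                  omega
                rw [hb]
                simp [pvScanA, pvAllowed, h5, h10, h20, h50, h100, h500, h1000,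
                  PySem.List.pyGet?, PySem.List.pyIdx?]
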